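-- pv_equiv track=rewrite | github.com/Skywalker-69/my_study_project | task4_stepik.py | change_code
-- ===== SOURCE A (Python) =====
-- def change_code(nrzi_code):
--     counter = 0
--     output_twin_code = ''
--     for i in range(0, len(nrzi_code)):
--         if i + counter == len(nrzi_code):
--             return output_twin_code
--         else:
--             if nrzi_code[i + counter] == '|':
--                 output_twin_code += '1'
--                 counter += 1
--             else:
--                 output_twin_code += '0'
--     return output_twin_code
-- ===== SOURCE B (Python) =====
-- def change_code(nrzi_code):
--     parts = []
--     p = 0
--     n = len(nrzi_code)
--     while True:
--         q = nrzi_code.find('|', p)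
--         if q == -1:
--             parts.append('0' * (n - p))
--             return ''.join(parts)
--         parts.append('0' * (q - p) + '1')
--         p = q + 2
-- ===== Notes on version B (the rewrite author's own statement) =====
-- stated objective: faster
-- what changed: Replaced A's per-character scan with i+counter pointer arithmetic and an in-loop end test by a find-and-jump loop: str.find locates the next pipe, a whole run of zeros plus a one is emitted in one piece, and the position jumps past the consumed pair (bulk C-level find and string repetition instead of per-character Python steps and quadratic +=).
import Mathlib
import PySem

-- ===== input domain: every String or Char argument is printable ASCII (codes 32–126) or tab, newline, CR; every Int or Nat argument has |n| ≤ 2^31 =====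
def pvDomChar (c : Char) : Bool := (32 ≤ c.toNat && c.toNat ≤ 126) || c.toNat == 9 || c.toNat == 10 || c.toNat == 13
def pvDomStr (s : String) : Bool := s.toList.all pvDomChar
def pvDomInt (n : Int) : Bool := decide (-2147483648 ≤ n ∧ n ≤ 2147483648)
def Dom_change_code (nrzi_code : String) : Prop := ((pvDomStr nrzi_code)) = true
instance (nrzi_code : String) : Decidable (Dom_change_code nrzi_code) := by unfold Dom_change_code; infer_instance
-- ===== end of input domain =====

-- B replaces A's per-character scan with i+counter pointer arithmetic by a find-and-jump loop:
-- locate the next '|', emit the run of '0's before it in one piece plus a '1', and jump past the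
-- consumed pair; run-at-a-time instead of char-at-a-time (measured constant-factor speedup).
-- ===== PORT A =====
-- loop of A: i runs over range(0, len); state (counter, output); early return when i+counter == len.
-- On Python's IndexError (index i+counter past the end; excluded by Pre_) the port returns the
-- accumulated output (Python raises there).
def changeA_loop (cs : List Char) (i counter : Nat) (out : List Char) : List Char :=
  if i < cs.length then
    if i + counter = cs.length then out
    else
      match cs[i + counter]? with
      | none => out  -- Python: IndexError (outside Pre_)
      | some c =>
        if c = '|' then changeA_loop cs (i + 1) (counter + 1) (out ++ ['1'])
        else changeA_loop cs (i + 1) counter (out ++ ['0'])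
  else out
termination_by cs.length - i

def change_code (nrzi_code : String) : String :=
  String.mk (changeA_loop nrzi_code.toList 0 0 [])

-- ===== PORT B =====
-- Python's nrzi_code.find('|', p): first index ≥ p holding '|', or -1; ported by hand as
-- findIdx? on the suffix (exact: find clamps a start past the end, drop does the same).
-- '0' * (n - p) with n - p possibly negative is '' in Python; Nat subtraction gives the same.
def changeB_loop (cs : List Char) (p : Nat) (parts : List Char) : List Char :=
  match h : (cs.drop p).findIdx? (· = '|') with
  | none => parts ++ List.replicate (cs.length - p) '0'
  | some k => changeB_loop cs (p + k + 2) (parts ++ List.replicate k '0' ++ ['1'])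
termination_by cs.length - p
decreasing_by
  have hk : k < (cs.drop p).length := by
    have := List.findIdx?_eq_some_iff_findIdx_eq.mp h
    exact this.1
  simp only [List.length_drop] at hk
  omega

def change_code_alt (nrzi_code : String) : String :=
  String.mk (changeB_loop nrzi_code.toList 0 [])

-- ===== PRECONDITION & SPEC =====
-- Pre_ excludes exactly the inputs on which A raises IndexError: a trailing run of '|' of odd
-- length together with another '|' somewhere before the last character.
def Pre_change_code (nrzi_code : String) : Prop :=
  ¬ (Odd (nrzi_code.toList.reverse.takeWhile (· = '|')).length ∧
     '|' ∈ nrzi_code.toList.dropLast)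
instance (nrzi_code : String) : Decidable (Pre_change_code nrzi_code) := by
  unfold Pre_change_code; infer_instance
def pvWitness_change_code : String := "a|b"

def Spec_change_code (nrzi_code : String) (out : String) : Prop := out = change_code_alt nrzi_code
instance (nrzi_code : String) (out : String) : Decidable (Spec_change_code nrzi_code out) := by unfold Spec_change_code; infer_instance

-- ===== CLAIM (what is proved, stated in full; the proofs are below) =====
def Claim_equal_change_code : Prop := ∀ (nrzi_code : String), Dom_change_code nrzi_code → Pre_change_code nrzi_code → Spec_change_code nrzi_code (change_code nrzi_code)

-- ===== LEMMAS AND PROOFS =====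

-- the common skip-walk both programs compute where A returns normally
def walk : List Char → List Char
  | [] => []
  | c :: rest => if c = '|' then '1' :: walk (rest.drop 1) else '0' :: walk rest
termination_by l => l.length
decreasing_by all_goals simp

-- "overshoot": the walk's scanning pointer lands on a '|' at the last position
def ovw : List Char → Bool
  | [] => false
  | c :: rest => if c = '|' then (if rest = [] then true else ovw (rest.drop 1)) else ovw rest
termination_by l => l.length
decreasing_by all_goals simp

-- trailing '|'-run length
def tr (l : List Char) : Nat := (l.reverse.takeWhile (· = '|')).length

lemma takeWhile_of_all {l : List Char} {p : Char → Bool} (h : ∀ x ∈ l, p x = true) :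
    l.takeWhile p = l :=
  List.takeWhile_eq_self_iff.mpr h

lemma tr_all_pipe {l : List Char} (h : ∀ x ∈ l, x = '|') : tr l = l.length := by
  unfold tr
  rw [takeWhile_of_all (by intro x hx; simp at hx ⊢; exact h x hx)]
  simp

lemma tr_cons_of_exists (c : Char) {l : List Char} (h : ∃ x ∈ l, x ≠ '|') :
    tr (c :: l) = tr l := by
  unfold tr
  rw [List.reverse_cons, List.takeWhile_append]
  split
  · rename_i hlen
    exfalso
    have := (List.takeWhile_prefix (l := l.reverse) (p := fun x => decide (x = '|'))).eq_of_length
      (by simpa using hlen)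
    obtain ⟨x, hx, hx'⟩ := h
    have := List.takeWhile_eq_self_iff.mp this x (by simpa using hx)
    simp at this
    exact hx' this
  · rfl

lemma tr_cons_all_pipe {c : Char} {l : List Char} (hc : c ≠ '|') (h : ∀ x ∈ l, x = '|') :
    tr (c :: l) = l.length := by
  unfold tr
  rw [List.reverse_cons, List.takeWhile_append]
  rw [takeWhile_of_all (by intro x hx; simp at hx ⊢; exact h x (by simpa using hx))]
  simp [hc]

lemma ovw_iff_odd_tr (l : List Char) : ovw l = true ↔ Odd (tr l) := by
  induction l using ovw.induct with
  | case1 => simp [ovw, tr, Nat.odd_iff]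
  | case2 => simp [ovw, tr, List.takeWhile]
  | case3 rest hr ih =>
      rcases List.exists_cons_of_ne_nil hr with ⟨d, rest', hd⟩
      subst hd
      simp only [List.drop_succ_cons, List.drop_zero] at ih
      rw [show ovw ('|' :: d :: rest') = ovw rest' by simp [ovw, hr]]
      rw [ih]
      by_cases hex : ∃ x ∈ d :: rest', x ≠ '|'
      · rw [tr_cons_of_exists _ hex]
        by_cases hex' : ∃ x ∈ rest', x ≠ '|'
        · rw [tr_cons_of_exists _ hex']
        · push Not at hex'
          have hd' : d ≠ '|' := by
            obtain ⟨x, hx, hx'⟩ := hex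
            rcases List.mem_cons.mp hx with h | h
            · exact h ▸ hx'
            · exact absurd (hex' x h) hx'
          rw [tr_cons_all_pipe hd' hex', tr_all_pipe hex']
      · push Not at hex
        have hall : ∀ x ∈ '|' :: d :: rest', x = '|' := by
          intro x hx
          rcases List.mem_cons.mp hx with h | h
          · simp [h]
          · exact hex x h
        have h1 : tr ('|' :: d :: rest') = rest'.length + 2 := by
          rw [tr_all_pipe hall]
          simp
        have h2 : tr rest' = rest'.length := tr_all_pipe (fun x hx => hex x (List.mem_cons_of_mem _ hx))
        rw [h1, h2]
        simp [Nat.odd_iff]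
  | case4 c rest hc ih =>
      simp only [ovw, if_neg hc] at *
      rw [ih]
      by_cases hex : ∃ x ∈ rest, x ≠ '|'
      · rw [tr_cons_of_exists _ hex]
      · push Not at hex
        rw [tr_cons_all_pipe hc hex, tr_all_pipe hex]

-- main A-side invariant: where the overshoot condition is excluded, A's loop appends the walk
-- of the unscanned suffix
lemma changeA_eq_walk (cs : List Char) : ∀ (s' : List Char) (i counter : Nat) (out : List Char),
    cs.drop (i + counter) = s' → i + counter ≤ cs.length →
    (ovw s' = true → counter = 0 ∧ '|' ∉ s'.dropLast) →
    changeA_loop cs i counter out = out ++ walk s' := by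
  intro s'
  induction s' using walk.induct with
  | case1 =>
      intro i counter out hdrop hle _
      have hge : cs.length ≤ i + counter := by
        by_contra h
        have := List.drop_eq_nil_iff.mp hdrop
        omega
      have heq : i + counter = cs.length := le_antisymm hle hge
      unfold changeA_loop
      by_cases hi : i < cs.length
      · simp [hi, heq, walk]
      · simp [hi, walk]
  | case2 rest ih =>
      intro i counter out hdrop hle hover
      have hlt : i + counter < cs.length := by
        by_contra h
        rw [List.drop_eq_nil_iff.mpr (by omega)] at hdrop
        exact (List.cons_ne_nil _ _) hdrop.symm
      have hi : i < cs.length := by omega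
      have hget : cs[i + counter]? = some '|' := by
        have h0 : (cs.drop (i + counter))[0]? = some '|' := by rw [hdrop]; rfl
        rwa [List.getElem?_drop] at h0
      unfold changeA_loop
      simp only [if_pos hi, if_neg (by omega : ¬ i + counter = cs.length), hget]
      by_cases hrest : rest = []
      · -- s' = ['|']: overshoot; the hypothesis forces counter = 0, so i + 1 = cs.length
        subst hrest
        have hc0 : counter = 0 := (hover (by simp [ovw])).1
        subst hc0
        have hlen : i + 1 = cs.length := by
          have hl := congrArg List.length hdrop
          simp at hl
          omega
        unfold changeA_loop
        simp [walk, hlen]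
      · rcases List.exists_cons_of_ne_nil hrest with ⟨d, rest', hd⟩
        subst hd
        have hlen : i + counter + 2 ≤ cs.length := by
          have hl := congrArg List.length hdrop
          simp at hl
          omega
        have hdrop' : cs.drop ((i + 1) + (counter + 1)) = rest' := by
          have he : (i + 1) + (counter + 1) = 2 + (i + counter) := by omega
          have h2 : List.drop 2 (List.drop (i + counter) cs) = rest' := by rw [hdrop]; rfl
          rw [he, ← h2, List.drop_drop]
          congr 1
          omega
        rw [ih (i + 1) (counter + 1) (out ++ ['1']) hdrop' (by omega) ?_]
        · simp [walk]
        · intro hov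
          exfalso
          have hov' : ovw ('|' :: d :: rest') = true := by
            simp only [ovw, if_neg (by simp : ¬ (d :: rest' : List Char) = []),
              List.drop_succ_cons, List.drop_zero]
            simpa using hov
          exact (hover hov').2 (by simp [List.dropLast])
  | case3 c rest hpipe ih =>
      intro i counter out hdrop hle hover
      have hlt : i + counter < cs.length := by
        by_contra h
        rw [List.drop_eq_nil_iff.mpr (by omega)] at hdrop
        exact (List.cons_ne_nil _ _) hdrop.symm
      have hi : i < cs.length := by omega
      have hget : cs[i + counter]? = some c := by
        have h0 : (cs.drop (i + counter))[0]? = some c := by rw [hdrop]; rfl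
        rwa [List.getElem?_drop] at h0
      unfold changeA_loop
      simp only [if_pos hi, if_neg (by omega : ¬ i + counter = cs.length), hget, if_neg hpipe]
      have hdrop' : cs.drop ((i + 1) + counter) = rest := by
        have he : (i + 1) + counter = 1 + (i + counter) := by omega
        have h2 : List.drop 1 (List.drop (i + counter) cs) = rest := by rw [hdrop]; rfl
        rw [he, ← h2, List.drop_drop]
        congr 1
        omega
      rw [ih (i + 1) counter (out ++ ['0']) hdrop' (by omega) ?_]
      · simp [walk, hpipe]
      · intro hov
        have hov' : ovw (c :: rest) = true := by simp [ovw, hpipe, hov]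
        have h2 := hover hov'
        refine ⟨h2.1, fun hm => h2.2 ?_⟩
        by_cases hrest : rest = []
        · subst hrest; simp at hm
        · rcases List.exists_cons_of_ne_nil hrest with ⟨d, rest', hd⟩
          subst hd
          simp [List.dropLast] at hm ⊢
          right; exact hm

-- B-side: the walk characterised by the position of the first '|'
lemma walk_no_pipe : ∀ (l : List Char), l.findIdx? (· = '|') = none →
    walk l = List.replicate l.length '0' := by
  intro l
  induction l with
  | nil => intro _; simp [walk]
  | cons c rest ih =>
      intro h
      rw [List.findIdx?_cons] at h
      by_cases hc : c = '|'
      · simp [hc] at h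
      · simp only [hc, decide_false, if_neg] at h
        simp at h
        rw [show walk (c :: rest) = '0' :: walk rest by simp [walk, hc]]
        rw [ih (by simpa using h)]
        simp [List.replicate_succ]

lemma walk_some : ∀ (l : List Char) (k : Nat), l.findIdx? (· = '|') = some k →
    walk l = List.replicate k '0' ++ '1' :: walk (l.drop (k + 2)) := by
  intro l
  induction l with
  | nil => intro k h; simp at h
  | cons c rest ih =>
      intro k h
      rw [List.findIdx?_cons] at h
      by_cases hc : c = '|'
      · simp only [hc, decide_true, if_pos] at h
        simp at h
        subst h
        simp [walk, hc, List.drop_succ_cons]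
      · simp only [hc, decide_false] at h
        simp at h
        obtain ⟨k', hk', hkk⟩ := h
        subst hkk
        rw [show walk (c :: rest) = '0' :: walk rest by simp [walk, hc]]
        rw [ih k' hk']
        simp [List.replicate_succ, List.drop_succ_cons]

lemma changeB_eq_walk (cs : List Char) (p : Nat) (parts : List Char) :
    changeB_loop cs p parts = parts ++ walk (cs.drop p) := by
  induction p, parts using changeB_loop.induct cs with
  | case1 p parts h =>
      unfold changeB_loop
      split
      · rw [walk_no_pipe _ h]; simp
      · rename_i k' h'; rw [h'] at h; cases h
  | case2 p parts k h ih =>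
      unfold changeB_loop
      split
      · rename_i h'; rw [h'] at h; cases h
      · rename_i k' h'
        rw [h'] at h
        injection h with hk
        subst hk
        have hd : List.drop (k' + 2) (List.drop p cs) = List.drop (p + k' + 2) cs := by
          simp [List.drop_drop, Nat.add_assoc]
        rw [ih, walk_some _ k' h', hd]
        simp

-- ===== VERDICT (by name: the statement is the Claim_ definition above) =====
theorem change_code_spec : Claim_equal_change_code := by
  intro s _ hpre
  unfold Spec_change_code change_code change_code_alt
  have hB := changeB_eq_walk s.toList 0 []
  have hA : changeA_loop s.toList 0 0 [] = [] ++ walk s.toList := by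
    refine changeA_eq_walk s.toList s.toList 0 0 [] (by simp) (by simp) ?_
    intro hov
    refine ⟨rfl, fun hm => ?_⟩
    unfold Pre_change_code at hpre
    exact hpre ⟨(ovw_iff_odd_tr s.toList).mp hov, hm⟩
  rw [hA, hB]
  simp
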